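-- pv_equiv track=rewrite | github.com/retomydb/retomybd | scraper/hf_mass_import.py | _detect_library
-- ===== SOURCE A (Python) =====
-- def _detect_library(tags, library_name):
--     if library_name:
--         return library_name
--     LIBS = {
--         "transformers", "diffusers", "sentence-transformers", "tokenizers",
--         "timm", "peft", "adapter-transformers", "spacy", "flair",
--         "fairseq", "espnet", "speechbrain", "nemo", "paddlenlp",
--         "setfit", "span-marker", "scikit-learn", "fasttext",
--         "stable-baselines3", "open_clip", "keras", "fastai",
--     }
--     tag_set = {t.lower() for t in tags}
--     for lib in sorted(LIBS):
--         if lib in tag_set: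
--             return lib
--     return None
-- ===== SOURCE B (Python) =====
-- _LIBS = frozenset({
--     "transformers", "diffusers", "sentence-transformers", "tokenizers",
--     "timm", "peft", "adapter-transformers", "spacy", "flair",
--     "fairseq", "espnet", "speechbrain", "nemo", "paddlenlp",
--     "setfit", "span-marker", "scikit-learn", "fasttext",
--     "stable-baselines3", "open_clip", "keras", "fastai",
-- })
--
-- def _detect_library(tags, library_name):
--     if library_name:
--         return library_name
--     # One pass over the tags, keeping the lexicographically smallest known library
--     # seen so far.  Correct because the first element of sorted(LIBS) that occurs
--     # among the lowered tags is exactly the smallest lowered tag that is a library.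
--     best = None
--     for t in tags:
--         t = t.lower()
--         if t in _LIBS and (best is None or t < best):
--             best = t
--     return best
-- ===== Notes on version B (the rewrite author's own statement) =====
-- stated objective: alternative
-- what changed: Instead of building a set of lowered tags and scanning sorted(LIBS) with membership tests, B makes a single pass over the tags themselves with a running-min accumulator, keeping the lexicographically smallest lowered tag that is a known library; no tag set and no sort are built.
import Mathlib
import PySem

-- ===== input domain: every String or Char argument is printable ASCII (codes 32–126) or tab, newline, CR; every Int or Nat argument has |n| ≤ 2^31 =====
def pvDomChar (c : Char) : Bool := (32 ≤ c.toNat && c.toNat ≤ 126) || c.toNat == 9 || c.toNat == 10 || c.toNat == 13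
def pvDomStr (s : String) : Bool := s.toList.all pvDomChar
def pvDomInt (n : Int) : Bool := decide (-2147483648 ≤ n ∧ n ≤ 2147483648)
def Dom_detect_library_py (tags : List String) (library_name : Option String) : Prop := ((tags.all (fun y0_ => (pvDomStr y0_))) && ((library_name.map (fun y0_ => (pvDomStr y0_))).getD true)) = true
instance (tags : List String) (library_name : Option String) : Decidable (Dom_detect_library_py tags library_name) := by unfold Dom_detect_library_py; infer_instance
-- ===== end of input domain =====

-- B makes a single running-min pass over the tags themselves instead of scanning sorted(LIBS)
-- against a tag set; same return value (alternative decomposition, not claimed faster).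


-- ===== PORT A =====
-- the fixed library-set literal (the same constant appears in both Pythons)
def pvLIBS : List String := ["transformers", "diffusers", "sentence-transformers", "tokenizers", "timm", "peft", "adapter-transformers", "spacy", "flair", "fairseq", "espnet", "speechbrain", "nemo", "paddlenlp", "setfit", "span-marker", "scikit-learn", "fasttext", "stable-baselines3", "open_clip", "keras", "fastai"]

-- A: build the lowered tag set, loop over sorted(LIBS), return the first lib in the tag set
def detect_library_py (tags : List String) (library_name : Option String) : Option String :=
  if library_name.getD "" ≠ "" then library_name
  else
    let tag_set : PySem.Set String := PySem.Set.ofList (tags.map PySem.Str.lower)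
    (PySem.List.sorted (PySem.Set.ofList pvLIBS) (fun x => x) false).find?
      (fun lib => PySem.Set.contains tag_set lib)

-- ===== PORT B =====
-- B: one pass over tags; keep the lexicographically smallest lowered tag that is a library
def detect_library_py_alt (tags : List String) (library_name : Option String) : Option String :=
  if library_name.getD "" ≠ "" then library_name
  else
    tags.foldl
      (fun best t =>
        let tl := PySem.Str.lower t
        if PySem.Set.contains (PySem.Set.ofList pvLIBS) tl ∧
            (best = none ∨ ∃ b, best = some b ∧ tl < b) then some tl
        else best)
      none

-- ===== PRECONDITION & SPEC =====
def Spec_detect_library_py (tags : List String) (library_name : Option String) (out : Option String) : Prop := out = detect_library_py_alt tags library_name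
instance (tags : List String) (library_name : Option String) (out : Option String) : Decidable (Spec_detect_library_py tags library_name out) := by unfold Spec_detect_library_py; infer_instance

-- ===== CLAIM (what is proved, stated in full; the proofs are below) =====
def Claim_equal_detect_library_py : Prop := ∀ (tags : List String) (library_name : Option String), Dom_detect_library_py tags library_name → Spec_detect_library_py tags library_name (detect_library_py tags library_name)

-- ===== LEMMAS AND PROOFS =====

-- combine an optional current best with a new candidate minimum
def pvOMin (a : Option String) (b : Option String) : Option String :=
  match a, b with
  | none, b => b
  | some x, none => some x
  | some x, some y => some (min x y)

lemma pvOMin_assoc (a b c : Option String) :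
    pvOMin (pvOMin a b) c = pvOMin a (pvOMin b c) := by
  cases a <;> cases b <;> cases c <;> simp [pvOMin, min_assoc]

-- B's loop step, named for the lemmas
def pvStep (best : Option String) (t : String) : Option String :=
  let tl := PySem.Str.lower t
  if PySem.Set.contains (PySem.Set.ofList pvLIBS) tl ∧
      (best = none ∨ ∃ b, best = some b ∧ tl < b) then some tl
  else best

lemma pvStep_eq_omin (best : Option String) (t : String) :
    pvStep best t =
      pvOMin best (if PySem.Set.contains (PySem.Set.ofList pvLIBS) (PySem.Str.lower t)
        then some (PySem.Str.lower t) else none) := by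
  show (if PySem.Set.contains (PySem.Set.ofList pvLIBS) (PySem.Str.lower t) ∧
      (best = none ∨ ∃ b, best = some b ∧ PySem.Str.lower t < b)
      then some (PySem.Str.lower t) else best) = _
  by_cases hc : PySem.Set.contains (PySem.Set.ofList pvLIBS) (PySem.Str.lower t)
  · rw [if_pos hc]
    cases best with
    | none => rw [if_pos ⟨hc, Or.inl rfl⟩]; rfl
    | some b =>
        by_cases hlt : PySem.Str.lower t < b
        · rw [if_pos ⟨hc, Or.inr ⟨b, rfl, hlt⟩⟩]
          show _ = some (min b (PySem.Str.lower t))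
          rw [min_eq_right (le_of_lt hlt)]
        · rw [if_neg]
          · show some b = some (min b (PySem.Str.lower t))
            rw [min_eq_left (le_of_not_gt hlt)]
          · rintro ⟨-, h | ⟨b', hb', hlt'⟩⟩
            · simp at h
            · cases Option.some.inj hb'; exact hlt hlt'
  · rw [if_neg hc, if_neg (fun h => hc h.1)]
    cases best <;> rfl

lemma min?_cons_omin (x : String) (t : List String) :
    PySem.List.min? (x :: t) (fun y => y) = pvOMin (some x) (PySem.List.min? t (fun y => y)) := by
  cases t with
  | nil => simp [PySem.List.min?, pvOMin]
  | cons z r =>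
      rw [PySem.List.min?_id_cons, PySem.List.min?_id_cons]
      show some (List.foldl min (min x z) r) = some (min x (List.foldl min z r))
      exact congrArg some (List.foldl_assoc)

-- B's fold computes min(filtered lowered tags), generalized over the accumulator
lemma fold_eq_min_filter (tags : List String) (acc : Option String) :
    tags.foldl pvStep acc =
      pvOMin acc (PySem.List.min?
        ((tags.map PySem.Str.lower).filter
          (fun tl => PySem.Set.contains (PySem.Set.ofList pvLIBS) tl)) (fun y => y)) := by
  induction tags generalizing acc with
  | nil => cases acc <;> simp [PySem.List.min?, pvOMin]
  | cons t r ih =>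
      simp only [List.foldl_cons, List.map_cons]
      rw [ih, pvStep_eq_omin, pvOMin_assoc]
      congr 1
      by_cases hc : PySem.Set.contains (PySem.Set.ofList pvLIBS) (PySem.Str.lower t)
      · rw [if_pos hc, List.filter_cons_of_pos hc, min?_cons_omin]
      · rw [if_neg hc, List.filter_cons_of_neg (by simpa using hc)]
        rfl

lemma foldl_min_self (x : String) (r : List String) (h : ∀ y ∈ r, x ≤ y) :
    r.foldl min x = x := by
  induction r with
  | nil => rfl
  | cons y t ih =>
      simp only [List.foldl_cons, min_eq_left (h y (by simp))]
      exact ih (fun z hz => h z (by simp [hz]))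

-- A's sorted scan is min of the filtered sorted list
lemma find_sorted_eq_min_filter (p : String → Bool) (l : List String)
    (hl : l.Pairwise (fun a b => a < b)) :
    PySem.List.min? (l.filter p) (fun x => x) = l.find? p := by
  induction l with
  | nil => rfl
  | cons x t ih =>
      rcases List.pairwise_cons.mp hl with ⟨hx, ht⟩
      by_cases hp : p x
      · rw [List.filter_cons_of_pos hp, List.find?_cons_of_pos hp,
          PySem.List.min?_id_cons, foldl_min_self]
        intro y hy
        exact le_of_lt (hx y (List.mem_of_mem_filter hy))
      · rw [List.filter_cons_of_neg (by simpa using hp),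
          List.find?_cons_of_neg (by simpa using hp)]
        exact ih ht

-- min? depends only on the set of elements
lemma min?_congr_mem (xs ys : List String) (h : ∀ x, x ∈ xs ↔ x ∈ ys) :
    PySem.List.min? xs (fun x => x) = PySem.List.min? ys (fun x => x) := by
  cases hx : PySem.List.min? xs (fun x => x) with
  | none =>
      cases hy : PySem.List.min? ys (fun x => x) with
      | none => rfl
      | some b =>
          have hb := PySem.List.min?_mem hy
          have hbx : b ∈ xs := (h b).mpr hb
          cases xs with
          | nil => simp at hbx
          | cons c t => rw [PySem.List.min?_id_cons] at hx; simp at hx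
  | some a =>
      cases hy : PySem.List.min? ys (fun x => x) with
      | none =>
          have ha := PySem.List.min?_mem hx
          have hay : a ∈ ys := (h a).mp ha
          cases ys with
          | nil => simp at hay
          | cons c t => rw [PySem.List.min?_id_cons] at hy; simp at hy
      | some b =>
          have ha := PySem.List.min?_mem hx
          have hb := PySem.List.min?_mem hy
          have h1 : a ≤ b := PySem.List.min?_isMin hx b ((h b).mpr hb)
          have h2 : b ≤ a := PySem.List.min?_isMin hy a ((h a).mp ha)
          rw [le_antisymm h1 h2]

lemma core_eq (tags : List String) :
    (PySem.List.sorted (PySem.Set.ofList pvLIBS) (fun x => x) false).find?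
      (fun lib => PySem.Set.contains (PySem.Set.ofList (tags.map PySem.Str.lower)) lib)
    = tags.foldl pvStep none := by
  rw [fold_eq_min_filter]
  rw [← find_sorted_eq_min_filter
        (fun lib => PySem.Set.contains (PySem.Set.ofList (tags.map PySem.Str.lower)) lib)
        _ (PySem.List.sorted_ofList_pairwise_lt pvLIBS)]
  simp only [pvOMin]
  apply min?_congr_mem
  intro x
  simp [List.mem_filter, PySem.List.mem_sorted, PySem.Set.contains, PySem.Set.mem_ofList,
    List.mem_map]
  tauto

-- ===== VERDICT (by name: the statement is the Claim_ definition above) =====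
theorem detect_library_py_spec : Claim_equal_detect_library_py := by
  intro tags library_name _
  unfold Spec_detect_library_py detect_library_py detect_library_py_alt
  by_cases h : library_name.getD "" ≠ ""
  · simp [h]
  · simp only [h, if_false]
    exact core_eq tags
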